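-- pv_equiv track=rewrite | github.com/loickengit/O_NJU_JK | 和最大的连续降序字符.py | solve
-- ===== SOURCE A (Python) =====
-- def solve(chs):
--     chs = [ord(c)-ord('A') for c in chs]
--     chs = set(chs)
--     ans = []
--     for c in sorted(chs, reverse=True):
--         for i in range(1, 25):
--             cur = [c]
--             while cur[-1] - i in chs:
--                 cur.append(cur[-1] - i)
--             if len(cur) > len(ans) or (len(cur) == len(ans) and len(cur) >= 2 and cur[0]-cur[1] < ans[0] - ans[1]):
--                 ans = cur
--     ans = [chr(c + ord('A')) for c in ans]
--     return ans
-- ===== SOURCE B (Python) =====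
-- def solve(chs):
--     s = {ord(c) - 65 for c in chs}
--     asc = sorted(s)
--     # run-length DP: length[(i, v)] = chain length of the equal-step-i descending chain ending (bottom-up) at v
--     length = {}
--     for i in range(1, 25):
--         for v in asc:
--             length[(i, v)] = length.get((i, v - i), 0) + 1
--     best = None  # (chain length, step, start)
--     for c in reversed(asc):
--         for i in range(1, 25):
--             L = length.get((i, c), 0)
--             if best is None or L > best[0] or (L == best[0] and L >= 2 and i < best[1]):
--                 best = (L, i, c)
--     if best is None:
--         return []
--     L, i, c = best
--     return [chr(c - i * k + 65) for k in range(L)]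
-- ===== Notes on version B (the rewrite author's own statement) =====
-- stated objective: alternative
-- what changed: B replaces A's per-candidate while-loop chain walking by a run-length DP table (length[(i,v)] = length[(i,v-i)]+1 over the ascending sorted set) and keeps only a compact (length, step, start) best triple, rebuilding the winning chain once at the end.
import Mathlib
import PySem

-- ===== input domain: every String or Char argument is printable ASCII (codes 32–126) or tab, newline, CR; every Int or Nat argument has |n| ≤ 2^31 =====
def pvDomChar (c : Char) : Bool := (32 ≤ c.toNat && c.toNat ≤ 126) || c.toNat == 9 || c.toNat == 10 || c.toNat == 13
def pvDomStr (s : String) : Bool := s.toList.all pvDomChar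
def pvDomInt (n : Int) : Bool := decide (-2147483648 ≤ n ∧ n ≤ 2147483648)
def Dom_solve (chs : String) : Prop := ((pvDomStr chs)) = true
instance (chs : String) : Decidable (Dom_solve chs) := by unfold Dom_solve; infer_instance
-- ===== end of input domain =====

-- B replaces A's per-candidate while-loop chain walking by a run-length DP table over the sorted
-- letter set and keeps only a compact (length, step, start) best triple, rebuilding the chain at
-- the end (objective: alternative algorithm).

-- ===== PORT A =====
-- termination-measure lemma for the while-loop port aChain (cited by its decreasing_by)
theorem pvCountLt_lt (S : List Int) (a c : Int) (ha : a ∈ S) (h : a < c) :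
    S.countP (fun x => decide (x < a)) < S.countP (fun x => decide (x < c)) := by
  induction S with
  | nil => cases ha
  | cons x t ih =>
    have hle : t.countP (fun y => decide (y < a)) ≤ t.countP (fun y => decide (y < c)) :=
      List.countP_mono_left (fun y _ hy => by
        simp only [decide_eq_true_eq] at hy ⊢; omega)
    simp only [List.countP_cons, decide_eq_true_eq]
    rcases List.mem_cons.mp ha with h1 | hmem
    · subst h1; split_ifs <;> omega
    · have := ih hmem; split_ifs <;> omega

-- the Python while loop 'cur = [c]; while cur[-1] - i in chs: cur.append(cur[-1] - i)';
-- the '0 < i' conjunct only makes the recursion well-founded: A's loop always runs with 1 ≤ i ≤ 24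
def aChain (S : List Int) (i c : Int) : List Int :=
  if h : 0 < i ∧ (c - i) ∈ S then c :: aChain S i (c - i) else [c]
termination_by S.countP (fun x => decide (x < c))
decreasing_by exact pvCountLt_lt S (c - i) c h.2 (by omega)

-- cur[0] - cur[1]; only evaluated under the 'len >= 2' guard in A
def aStep : List Int → Int
  | a :: b :: _ => a - b
  | _ => 0

-- body of A's inner loop: the candidate chain and the conditional update of ans
def aUpd (S : List Int) (ans : List Int) (c i : Int) : List Int :=
  let cur := aChain S i c
  if ans.length < cur.length ∨ (cur.length = ans.length ∧ 2 ≤ cur.length ∧ aStep cur < aStep ans)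
  then cur else ans

def solve (chs : String) : List String :=
  let S : List Int := PySem.Set.ofList (chs.toList.map (fun ch => (ch.toNat : Int) - 65))
  let ans : List Int :=
    (PySem.List.sorted S (fun x => x) true).foldl
      (fun ans c => (PySem.List.pyRange 1 25 1).foldl (fun ans i => aUpd S ans c i) ans) []
  -- chr(v + 65): exact, every chain element v came from some character ch as ch.toNat - 65
  ans.map (fun v => String.ofList [Char.ofNat (v + 65).toNat])

-- ===== PORT B =====
-- length[(i, v)] = length.get((i, v - i), 0) + 1 over all i in 1..24, v in ascending sorted order
def bDP (asc : List Int) : PySem.Dict (Int × Int) Int :=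
  (PySem.List.pyRange 1 25 1).foldl
    (fun d i => asc.foldl (fun d v => d.insert (i, v) (d.getD (i, v - i) 0 + 1)) d)
    PySem.Dict.empty

-- body of B's selection loop: 'best is None or ...' tuple update from Source B
def bUpd (lengths : PySem.Dict (Int × Int) Int) (best : Option (Int × Int × Int)) (c i : Int) :
    Option (Int × Int × Int) :=
  let L := lengths.getD (i, c) 0
  match best with
  | none => some (L, i, c)
  | some (bL, bI, _) => if bL < L ∨ (L = bL ∧ 2 ≤ L ∧ i < bI) then some (L, i, c) else best

def solve_alt (chs : String) : List String :=
  let s : List Int := PySem.Set.ofList (chs.toList.map (fun ch => (ch.toNat : Int) - 65))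
  let asc := PySem.List.sorted s (fun x => x) false
  let lengths := bDP asc
  let best :=
    asc.reverse.foldl
      (fun best c => (PySem.List.pyRange 1 25 1).foldl (fun best i => bUpd lengths best c i) best)
      none
  match best with
  | none => []
  | some (L, i, c) =>
      -- chr(c - i*k + 65): exact, every rebuilt element is a chain element (see port A's note)
      (PySem.List.pyRange 0 L 1).map (fun k => String.ofList [Char.ofNat (c - i * k + 65).toNat])

-- ===== PRECONDITION & SPEC =====
def Spec_solve (chs : String) (out : List String) : Prop := out = solve_alt chs
instance (chs : String) (out : List String) : Decidable (Spec_solve chs out) := by unfold Spec_solve; infer_instance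

-- ===== CLAIM (what is proved, stated in full; the proofs are below) =====
def Claim_equal_solve : Prop := ∀ (chs : String), Dom_solve chs → Spec_solve chs (solve chs)

-- ===== LEMMAS AND PROOFS =====

theorem aChain_ne_nil (S : List Int) (i c : Int) : ∃ t, aChain S i c = c :: t := by
  rw [aChain]; split <;> exact ⟨_, rfl⟩

theorem aChain_of_mem (S : List Int) (i c : Int) (hi : 0 < i) (hm : c - i ∈ S) :
    aChain S i c = c :: aChain S i (c - i) := by
  rw [aChain, dif_pos ⟨hi, hm⟩]

theorem aChain_of_not_mem (S : List Int) (i c : Int) (hm : ¬ (0 < i ∧ c - i ∈ S)) :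
    aChain S i c = [c] := by
  rw [aChain, dif_neg hm]

theorem aStep_aChain (S : List Int) (i c : Int) (h : 2 ≤ (aChain S i c).length) :
    aStep (aChain S i c) = i := by
  by_cases hg : 0 < i ∧ (c - i) ∈ S
  · rw [aChain_of_mem S i c hg.1 hg.2]
    obtain ⟨t, ht⟩ := aChain_ne_nil S i (c - i)
    rw [ht]
    show c - (c - i) = i
    ring
  · rw [aChain_of_not_mem S i c hg] at h
    simp at h

theorem aChain_eq_map_range (S : List Int) (i c : Int) :
    aChain S i c = (List.range (aChain S i c).length).map (fun k : Nat => c - i * (k : Int)) := by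
  induction c using aChain.induct S i with
  | case1 c h ih =>
    rw [aChain_of_mem S i c h.1 h.2]
    simp only [List.length_cons, List.range_succ_eq_map, List.map_cons, List.map_map]
    refine List.cons_eq_cons.mpr ⟨by push_cast; ring, ?_⟩
    conv_lhs => rw [ih]
    apply List.map_congr_left
    intro k _
    simp only [Function.comp_apply]
    push_cast
    ring
  | case2 c h =>
    rw [aChain_of_not_mem S i c h]
    simp

-- a DP pass over one step i never touches keys with another first component
theorem dp_preserve (xs : List Int) (i : Int) (d : PySem.Dict (Int × Int) Int)
    (j w : Int) (hj : j ≠ i) :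
    (xs.foldl (fun d v => d.insert (i, v) (d.getD (i, v - i) 0 + 1)) d).getD (j, w) 0
      = d.getD (j, w) 0 := by
  induction xs generalizing d with
  | nil => rfl
  | cons v t ih =>
    simp only [List.foldl_cons]
    rw [ih]
    rw [PySem.Dict.getD_insert]
    rw [if_neg (by simp [Prod.ext_iff, hj])]

theorem dp_pass (S : List Int) (i : Int) (hi : 0 < i) :
    ∀ (remaining processed : List Int) (d : PySem.Dict (Int × Int) Int),
      (processed ++ remaining).Pairwise (· < ·) →
      (∀ v, v ∈ processed ++ remaining ↔ v ∈ S) →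
      (∀ w, d.getD (i, w) 0 = if w ∈ processed then ((aChain S i w).length : Int) else 0) →
      ∀ w, (remaining.foldl (fun d v => d.insert (i, v) (d.getD (i, v - i) 0 + 1)) d).getD (i, w) 0
          = if w ∈ processed ++ remaining then ((aChain S i w).length : Int) else 0 := by
  intro remaining
  induction remaining with
  | nil => intro processed d _ _ hd w; simpa using hd w
  | cons v t ih =>
    intro processed d hpw hmem hd w
    have hsplit : (processed ++ [v]) ++ t = processed ++ v :: t := by simp
    simp only [List.foldl_cons]
    have hres := ih (processed ++ [v]) (d.insert (i, v) (d.getD (i, v - i) 0 + 1))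
        (by rw [hsplit]; exact hpw) (by intro u; rw [hsplit]; exact hmem u) ?_ w
    · rw [hres, hsplit]
    -- the inserted value is the chain length of v
    intro w'
    have hvlen : d.getD (i, v - i) 0 + 1 = ((aChain S i v).length : Int) := by
      have hdv := hd (v - i)
      by_cases hvm : v - i ∈ S
      · have hproc : v - i ∈ processed := by
          have hin : v - i ∈ processed ++ v :: t := (hmem (v - i)).mpr hvm
          rcases List.mem_append.mp hin with hp | hvt
          · exact hp
          · exfalso
            have hpw2 : (v :: t).Pairwise (· < ·) := (List.pairwise_append.mp hpw).2.1
            rcases List.mem_cons.mp hvt with he | htl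
            · omega
            · have := (List.pairwise_cons.mp hpw2).1 _ htl
              omega
        rw [hdv, if_pos hproc, aChain_of_mem S i v hi hvm]
        simp
      · have hnproc : v - i ∉ processed := fun hp =>
          hvm ((hmem (v - i)).mp (List.mem_append.mpr (Or.inl hp)))
        rw [hdv, if_neg hnproc, aChain_of_not_mem S i v (fun hg => hvm hg.2)]
        simp
    rw [PySem.Dict.getD_insert]
    by_cases hwv : w' = v
    · subst hwv
      rw [if_pos rfl, hvlen, if_pos (List.mem_append.mpr (Or.inr (List.mem_singleton.mpr rfl)))]
    · rw [if_neg (by simp [Prod.ext_iff, hwv]), hd w']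
      have : (w' ∈ processed ++ [v]) ↔ w' ∈ processed := by simp [hwv]
      rw [if_congr this rfl rfl]

-- folding the remaining passes never touches component j
theorem dp_preserve_many (asc : List Int) :
    ∀ (ts : List Int) (d : PySem.Dict (Int × Int) Int) (j w : Int), j ∉ ts →
      (ts.foldl (fun d i => asc.foldl (fun d v => d.insert (i, v) (d.getD (i, v - i) 0 + 1)) d) d).getD (j, w) 0
        = d.getD (j, w) 0 := by
  intro ts
  induction ts with
  | nil => intro d j w _; rfl
  | cons i t ih =>
    intro d j w hj
    simp only [List.foldl_cons]
    rw [ih _ _ _ (fun h => hj (List.mem_cons_of_mem _ h))]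
    exact dp_preserve asc i d j w (fun h => hj (h ▸ List.mem_cons_self ..))

theorem dp_build (S asc : List Int) (hpw : asc.Pairwise (· < ·)) (hmem : ∀ v, v ∈ asc ↔ v ∈ S) :
    ∀ (is : List Int) (d : PySem.Dict (Int × Int) Int), is.Nodup → (∀ i ∈ is, 0 < i) →
      (∀ i ∈ is, ∀ w, d.getD (i, w) 0 = 0) →
      ∀ i ∈ is, ∀ w,
        (is.foldl (fun d i => asc.foldl (fun d v => d.insert (i, v) (d.getD (i, v - i) 0 + 1)) d) d).getD (i, w) 0
          = if w ∈ asc then ((aChain S i w).length : Int) else 0 := by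
  intro is
  induction is with
  | nil => intro d _ _ _ i hi; cases hi
  | cons j t ih =>
    intro d hnd hpos hz i hi w
    simp only [List.foldl_cons]
    rcases List.mem_cons.mp hi with rfl | hit
    · rw [dp_preserve_many asc t _ i w (List.nodup_cons.mp hnd).1]
      have := dp_pass S i (hpos i (List.mem_cons_self ..)) asc [] d
          (by simpa using hpw) (by simpa using hmem)
          (by intro w'; simpa using hz i (List.mem_cons_self ..) w') w
      simpa using this
    · exact ih _ (List.nodup_cons.mp hnd).2
        (fun x hx => hpos x (List.mem_cons_of_mem _ hx))
        (fun x hx w' => by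
          rw [dp_preserve asc j d x w'
            (fun he => (List.nodup_cons.mp hnd).1 (he ▸ hx))]
          exact hz x (List.mem_cons_of_mem _ hx) w')
        i hit w

-- simulation relation between A's ans list and B's best triple
def SimR (S ans : List Int) (best : Option (Int × Int × Int)) : Prop :=
  (ans = [] ∧ best = none) ∨
    ∃ i c, ans = aChain S i c ∧ best = some (((aChain S i c).length : Int), i, c)

theorem sel_step (S : List Int) (lengths : PySem.Dict (Int × Int) Int)
    (HL : ∀ i c, i ∈ PySem.List.pyRange 1 25 1 → c ∈ S →
        lengths.getD (i, c) 0 = ((aChain S i c).length : Int))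
    (c i : Int) (hc : c ∈ S) (hi : i ∈ PySem.List.pyRange 1 25 1)
    (ans : List Int) (best : Option (Int × Int × Int)) (hR : SimR S ans best) :
    SimR S (aUpd S ans c i) (bUpd lengths best c i) := by
  have hL : lengths.getD (i, c) 0 = ((aChain S i c).length : Int) := HL i c hi hc
  rcases hR with ⟨rfl, rfl⟩ | ⟨i0, c0, rfl, rfl⟩
  · simp only [aUpd, bUpd]
    obtain ⟨t, ht⟩ := aChain_ne_nil S i c
    rw [if_pos (Or.inl (by rw [ht]; simp))]
    exact Or.inr ⟨i, c, rfl, by rw [hL]⟩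
  · simp only [aUpd, bUpd]
    have hcond : (aChain S i0 c0).length < (aChain S i c).length ∨
        ((aChain S i c).length = (aChain S i0 c0).length ∧ 2 ≤ (aChain S i c).length ∧
          aStep (aChain S i c) < aStep (aChain S i0 c0))
        ↔ (((aChain S i0 c0).length : Int) < lengths.getD (i, c) 0 ∨
           (lengths.getD (i, c) 0 = ((aChain S i0 c0).length : Int) ∧
            2 ≤ lengths.getD (i, c) 0 ∧ i < i0)) := by
      rw [hL]
      constructor
      · rintro (h | ⟨h1, h2, h3⟩)
        · exact Or.inl (by exact_mod_cast h)
        · refine Or.inr ⟨by exact_mod_cast h1, by exact_mod_cast h2, ?_⟩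
          rw [aStep_aChain S i c h2, aStep_aChain S i0 c0 (h1 ▸ h2)] at h3
          exact h3
      · rintro (h | ⟨h1, h2, h3⟩)
        · exact Or.inl (by exact_mod_cast h)
        · have h1' : (aChain S i c).length = (aChain S i0 c0).length := by exact_mod_cast h1
          have h2' : 2 ≤ (aChain S i c).length := by exact_mod_cast h2
          refine Or.inr ⟨h1', h2', ?_⟩
          rw [aStep_aChain S i c h2', aStep_aChain S i0 c0 (h1' ▸ h2')]
          exact h3
    by_cases hA : (aChain S i0 c0).length < (aChain S i c).length ∨
        ((aChain S i c).length = (aChain S i0 c0).length ∧ 2 ≤ (aChain S i c).length ∧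
          aStep (aChain S i c) < aStep (aChain S i0 c0))
    · rw [if_pos hA, if_pos (hcond.mp hA)]
      exact Or.inr ⟨i, c, rfl, by rw [hL]⟩
    · rw [if_neg hA, if_neg (fun hb => hA (hcond.mpr hb))]
      exact Or.inr ⟨i0, c0, rfl, rfl⟩

theorem sel_fold (S : List Int) (lengths : PySem.Dict (Int × Int) Int)
    (HL : ∀ i c, i ∈ PySem.List.pyRange 1 25 1 → c ∈ S →
        lengths.getD (i, c) 0 = ((aChain S i c).length : Int)) :
    ∀ (cs : List Int), (∀ c ∈ cs, c ∈ S) →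
      ∀ ans best, SimR S ans best →
      SimR S
        (cs.foldl (fun ans c => (PySem.List.pyRange 1 25 1).foldl (fun ans i => aUpd S ans c i) ans) ans)
        (cs.foldl (fun best c => (PySem.List.pyRange 1 25 1).foldl (fun best i => bUpd lengths best c i) best) best) := by
  intro cs
  induction cs with
  | nil => intro _ _ _ h; exact h
  | cons c cs ih =>
    intro hcs ans best h
    simp only [List.foldl_cons]
    apply ih (fun x hx => hcs x (List.mem_cons_of_mem _ hx))
    have inner : ∀ (is : List Int), (∀ i ∈ is, i ∈ PySem.List.pyRange 1 25 1) →
        ∀ ans best, SimR S ans best →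
        SimR S (is.foldl (fun ans i => aUpd S ans c i) ans)
          (is.foldl (fun best i => bUpd lengths best c i) best) := by
      intro is
      induction is with
      | nil => intro _ _ _ h; exact h
      | cons i it ih2 =>
        intro his ans best h
        simp only [List.foldl_cons]
        exact ih2 (fun x hx => his x (List.mem_cons_of_mem _ hx)) _ _
          (sel_step S lengths HL c i (hcs c (List.mem_cons_self ..))
            (his i (List.mem_cons_self ..)) ans best h)
    exact inner (PySem.List.pyRange 1 25 1) (fun x hx => hx) ans best h

-- ===== VERDICT (by name: the statement is the Claim_ definition above) =====
theorem solve_spec : Claim_equal_solve := by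
  unfold Claim_equal_solve
  intro chs _
  unfold Spec_solve
  simp only [solve, solve_alt]
  set vals : List Int := chs.toList.map (fun ch => (ch.toNat : Int) - 65) with hvals
  set S : List Int := PySem.Set.ofList vals with hS
  set asc := PySem.List.sorted S (fun x => x) false with hasc
  have hpw : asc.Pairwise (· < ·) := PySem.List.sorted_ofList_pairwise_lt vals
  have hmem : ∀ v, v ∈ asc ↔ v ∈ S := fun v => PySem.List.mem_sorted S (fun x => x) false v
  have hdesc : PySem.List.sorted S (fun x => x) true = asc.reverse :=
    PySem.List.sorted_rev_eq_of_perm_of_pairwise_gt S asc.reverse (fun x => x)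
      ((List.reverse_perm asc).trans (PySem.List.sorted_perm S (fun x => x) false))
      (List.pairwise_reverse.mpr (by simpa using hpw))
  have HL : ∀ i c, i ∈ PySem.List.pyRange 1 25 1 → c ∈ S →
      (bDP asc).getD (i, c) 0 = ((aChain S i c).length : Int) := by
    intro i c hi hc
    have := dp_build S asc hpw hmem (PySem.List.pyRange 1 25 1) PySem.Dict.empty
      (PySem.List.nodup_pyRange_one 1 25)
      (fun x hx => by have := PySem.List.mem_pyRange_one.mp hx; omega)
      (fun _ _ _ => PySem.Dict.getD_empty _ _) i hi c
    rw [bDP, this, if_pos ((hmem c).mpr hc)]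
  have hsim := sel_fold S (bDP asc) HL asc.reverse
    (fun c hcm => (hmem c).mp (List.mem_reverse.mp hcm)) [] none (Or.inl ⟨rfl, rfl⟩)
  rw [hdesc]
  rcases hsim with ⟨h1, h2⟩ | ⟨i, c, h1, h2⟩
  · rw [h1, h2]; rfl
  · rw [h1, h2]
    have hmr := aChain_eq_map_range S i c
    set n := (aChain S i c).length with hn
    show (aChain S i c).map (fun v => String.ofList [Char.ofNat (v + 65).toNat])
        = (PySem.List.pyRange 0 (n : Int) 1).map
            (fun k => String.ofList [Char.ofNat (c - i * k + 65).toNat])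
    rw [hmr, PySem.List.pyRange_one]
    have hnn : ((n : Int) - 0).toNat = n := by omega
    rw [hnn]
    simp only [List.map_map]
    apply List.map_congr_left
    intro k _
    simp only [Function.comp_apply]
    norm_num
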